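-- pv_equiv track=rewrite | github.com/khuhrohumayun/Interview_Questions | Q23.py | count_digits_Letters_Spaces
-- ===== SOURCE A (Python) =====
-- def count_digits_Letters_Spaces(s):
--     digits = 0
--     Letters = 0
--     Spaces = 0
--     for char in s:
--         if char.isdigit():
--             digits += 1
--         elif char.isalpha():
--             Letters += 1
--         elif char.isspace():
--             Spaces += 1
--
--     return digits, Letters, Spaces
-- ===== SOURCE B (Python) =====
-- def count_digits_Letters_Spaces(s):
--     return (sum(1 for c in s if c.isdigit()),
--             sum(1 for c in s if c.isalpha()),
--             sum(1 for c in s if c.isspace()))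
-- ===== Notes on version B (the rewrite author's own statement) =====
-- stated objective: idiomatic
-- what changed: Replaces the single fused loop with elif-priority accumulators by three independent generator-sum passes, one per category (safe because isdigit/isalpha/isspace are mutually exclusive per character).
import Mathlib
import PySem

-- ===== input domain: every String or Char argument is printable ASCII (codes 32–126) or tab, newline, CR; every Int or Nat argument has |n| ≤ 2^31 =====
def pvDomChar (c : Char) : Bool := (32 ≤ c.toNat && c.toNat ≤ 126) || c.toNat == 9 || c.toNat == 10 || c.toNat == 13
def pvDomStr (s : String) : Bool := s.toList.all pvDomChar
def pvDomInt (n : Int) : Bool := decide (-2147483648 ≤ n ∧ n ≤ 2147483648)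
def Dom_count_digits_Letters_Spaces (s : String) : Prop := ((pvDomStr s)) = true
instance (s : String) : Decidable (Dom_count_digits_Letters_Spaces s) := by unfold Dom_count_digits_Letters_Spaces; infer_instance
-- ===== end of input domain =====

-- B replaces A's single fused loop with an elif priority chain by three independent
-- one-category counting passes (idiomatic; same O(n) cost).

-- ===== PORT A =====
-- A: one loop over the characters with three accumulators and an if/elif chain.
def count_digits_Letters_Spaces (s : String) : Int × Int × Int :=
  s.toList.foldl (fun (acc : Int × Int × Int) c =>
    if PySem.Chars.isdigit c then (acc.1 + 1, acc.2.1, acc.2.2)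
    else if PySem.Chars.isalpha c then (acc.1, acc.2.1 + 1, acc.2.2)
    else if PySem.Chars.isspace c then (acc.1, acc.2.1, acc.2.2 + 1)
    else acc) (0, 0, 0)

-- ===== PORT B =====
-- B: three independent counting passes, one per predicate (sum(1 for c in s if p(c)) = countP).
def count_digits_Letters_Spaces_alt (s : String) : Int × Int × Int :=
  ((s.toList.countP (fun c => PySem.Chars.isdigit c) : Int),
   (s.toList.countP (fun c => PySem.Chars.isalpha c) : Int),
   (s.toList.countP (fun c => PySem.Chars.isspace c) : Int))

-- ===== PRECONDITION & SPEC =====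
def Spec_count_digits_Letters_Spaces (s : String) (out : Int × Int × Int) : Prop := out = count_digits_Letters_Spaces_alt s
instance (s : String) (out : Int × Int × Int) : Decidable (Spec_count_digits_Letters_Spaces s out) := by unfold Spec_count_digits_Letters_Spaces; infer_instance

-- ===== CLAIM (what is proved, stated in full; the proofs are below) =====
def Claim_equal_count_digits_Letters_Spaces : Prop := ∀ (s : String), Dom_count_digits_Letters_Spaces s → Spec_count_digits_Letters_Spaces s (count_digits_Letters_Spaces s)

-- ===== LEMMAS AND PROOFS =====

-- The three predicates are pairwise exclusive on every Char, so the elif priority never drops a count.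
theorem pv_digit_not_alpha (c : Char) (h : PySem.Chars.isdigit c = true) :
    PySem.Chars.isalpha c = false := by
  simp [PySem.Chars.isdigit, Char.le_def, UInt32.le_iff_toNat_le] at h
  simp [PySem.Chars.isalpha, PySem.Chars.isupper, PySem.Chars.islower, Char.le_def,
    UInt32.le_iff_toNat_le]
  omega

theorem pv_digit_not_space (c : Char) (h : PySem.Chars.isdigit c = true) :
    PySem.Chars.isspace c = false := by
  simp [PySem.Chars.isdigit, Char.le_def, UInt32.le_iff_toNat_le] at h
  simp [PySem.Chars.isspace]
  omega

theorem pv_alpha_not_space (c : Char) (h : PySem.Chars.isalpha c = true) :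
    PySem.Chars.isspace c = false := by
  simp [PySem.Chars.isalpha, PySem.Chars.isupper, PySem.Chars.islower, Char.le_def,
    UInt32.le_iff_toNat_le] at h
  simp [PySem.Chars.isspace]
  omega

theorem pv_foldl_counts (l : List Char) (d a sp : Int) :
    l.foldl (fun (acc : Int × Int × Int) c =>
      if PySem.Chars.isdigit c then (acc.1 + 1, acc.2.1, acc.2.2)
      else if PySem.Chars.isalpha c then (acc.1, acc.2.1 + 1, acc.2.2)
      else if PySem.Chars.isspace c then (acc.1, acc.2.1, acc.2.2 + 1)
      else acc) (d, a, sp)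
    = (d + (l.countP (fun c => PySem.Chars.isdigit c) : Int),
       a + (l.countP (fun c => PySem.Chars.isalpha c) : Int),
       sp + (l.countP (fun c => PySem.Chars.isspace c) : Int)) := by
  induction l generalizing d a sp with
  | nil => simp
  | cons c t ih =>
    by_cases hd : PySem.Chars.isdigit c = true
    · simp [List.foldl_cons, hd, pv_digit_not_alpha c hd, pv_digit_not_space c hd, ih]
      omega
    · by_cases ha : PySem.Chars.isalpha c = true
      · simp [List.foldl_cons, hd, ha, pv_alpha_not_space c ha, ih]
        omega
      · by_cases hs : PySem.Chars.isspace c = true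
        · simp [List.foldl_cons, hd, ha, hs, ih]
          omega
        · simp [List.foldl_cons, hd, ha, hs, ih]

-- ===== VERDICT (by name: the statement is the Claim_ definition above) =====
theorem count_digits_Letters_Spaces_spec : Claim_equal_count_digits_Letters_Spaces := by
  intro s _
  unfold Spec_count_digits_Letters_Spaces count_digits_Letters_Spaces count_digits_Letters_Spaces_alt
  rw [pv_foldl_counts]
  simp
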